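-- pv_equiv track=rewrite | github.com/WilliamThyer/wiki-reference-hound | wikipedia_dead_ref_finder/extract_references.py | find_best_original_url
-- ===== SOURCE A (Python) =====
-- from typing import List, Set, Dict, Tuple, Optional
--
-- def find_best_original_url(urls: List[str], preferred_protocol: str = 'https') -> str:
--     """
--     Find the best original URL from a list of URLs, preferring HTTPS over HTTP.
--
--     Args:
--         urls: List of URLs to choose from
--         preferred_protocol: Preferred protocol ('https' or 'http')
--
--     Returns:
--         Best URL to use as the original
--     """
--     if not urls:
--         return ""
--
--     # Filter out archive URLs
--     original_urls = [url for url in urls if not is_archive_url(url)]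
--
--     if not original_urls:
--         return ""
--
--     # If only one original URL, return it
--     if len(original_urls) == 1:
--         return original_urls[0]
--
--     # Prefer HTTPS over HTTP
--     https_urls = [url for url in original_urls if url.startswith('https://')]
--     http_urls = [url for url in original_urls if url.startswith('http://')]
--
--     if preferred_protocol == 'https' and https_urls:
--         return https_urls[0]
--     elif http_urls:
--         return http_urls[0]
--     elif https_urls:
--         return https_urls[0]
--
--     # Fallback to first URL
--     return original_urls[0]
--
-- def is_archive_url(url: str) -> bool:
--     """
--     Check if a URL is an archive link (web.archive.org, archive.today, etc.).
--
--     Args: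
--         url: URL to check
--
--     Returns:
--         True if the URL is an archive link
--     """
--     archive_domains = [
--         'web.archive.org',
--         'archive.today',
--         'archive.org',
--         'archive.is',
--         'archive.fo',
--         'archive.md',
--         'archive.ph',
--         'archive.li',
--         'archive.vn',
--         'webcitation.org',
--         'wayback.archive.org',
--         'ghostarchive.org'  # Added missing archive service
--     ]
--
--     for domain in archive_domains:
--         if domain in url:
--             return True
--
--     return False
-- ===== SOURCE B (Python) =====
-- def url_rank(url, preferred_protocol):
--     if preferred_protocol == 'https':
--         order = ('https://', 'http://')
--     else:
--         order = ('http://', 'https://')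
--     for r, prefix in enumerate(order):
--         if url.startswith(prefix):
--             return r
--     return 2
--
-- def find_best_original_url(urls, preferred_protocol='https'):
--     ranked = [(url_rank(u, preferred_protocol), u)
--               for u in urls if not is_archive_url(u)]
--     if not ranked:
--         return ""
--     return min(ranked, key=lambda t: t[0])[1]
--
-- def is_archive_url(url):
--     archive_domains = [
--         'web.archive.org', 'archive.today', 'archive.org', 'archive.is',
--         'archive.fo', 'archive.md', 'archive.ph', 'archive.li',
--         'archive.vn', 'webcitation.org', 'wayback.archive.org', 'ghostarchive.org',
--     ]
--     for domain in archive_domains: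
--         if domain in url:
--             return True
--     return False
-- ===== Notes on version B (the rewrite author's own statement) =====
-- stated objective: alternative
-- what changed: Replaces A's staged filter lists and four-way fallback cascade with a rank-and-select algorithm: each non-archive URL gets a protocol rank (0 = preferred protocol, 1 = the other, 2 = neither) and the answer is the first URL of minimal rank via min(); the singleton case and all fallbacks collapse into the single min.
import Mathlib
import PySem

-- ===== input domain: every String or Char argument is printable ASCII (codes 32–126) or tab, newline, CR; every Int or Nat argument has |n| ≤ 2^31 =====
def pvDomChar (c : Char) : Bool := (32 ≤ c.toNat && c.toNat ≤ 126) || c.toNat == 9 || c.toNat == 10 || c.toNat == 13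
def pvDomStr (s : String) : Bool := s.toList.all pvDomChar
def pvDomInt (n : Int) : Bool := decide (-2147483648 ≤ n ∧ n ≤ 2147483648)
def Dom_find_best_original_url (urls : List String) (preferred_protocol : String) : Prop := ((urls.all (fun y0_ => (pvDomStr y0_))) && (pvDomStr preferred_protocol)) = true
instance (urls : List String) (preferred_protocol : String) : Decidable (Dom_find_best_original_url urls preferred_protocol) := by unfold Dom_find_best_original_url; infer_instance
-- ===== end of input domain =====

-- B replaces A's staged filter lists and fallback cascade by a rank-and-select algorithm: each non-archive URL gets a protocol rank and min() picks the first URL of minimal rank (objective: alternative).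


-- ===== PORT A =====
def archive_domains : List String :=
  ["web.archive.org", "archive.today", "archive.org", "archive.is",
   "archive.fo", "archive.md", "archive.ph", "archive.li",
   "archive.vn", "webcitation.org", "wayback.archive.org", "ghostarchive.org"]

-- `for domain in archive_domains: if domain in url: return True` / `return False`
def is_archive_url (url : String) : Bool :=
  archive_domains.any (fun d => PySem.Str.isIn d url)

def find_best_original_url (urls : List String) (preferred_protocol : String) : String :=
  if urls.isEmpty then ""
  else
    let original_urls := urls.filter (fun u => !is_archive_url u)
    match original_urls with
    | [] => ""
    | o :: os =>
      if os.isEmpty then o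
      else
        let https_urls := original_urls.filter (fun u => PySem.Str.startswith u "https://")
        let http_urls := original_urls.filter (fun u => PySem.Str.startswith u "http://")
        if preferred_protocol == "https" && !https_urls.isEmpty then https_urls.headD ""
        else if !http_urls.isEmpty then http_urls.headD ""
        else if !https_urls.isEmpty then https_urls.headD ""
        else o

-- ===== PORT B =====
-- `for r, prefix in enumerate(order)` over the 2-tuple `order` = the two startswith checks in order
def url_rank (url : String) (preferred_protocol : String) : Int :=
  let order := if preferred_protocol == "https" then ("https://", "http://")
               else ("http://", "https://")
  if PySem.Str.startswith url order.1 then 0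
  else if PySem.Str.startswith url order.2 then 1
  else 2

def find_best_original_url_alt (urls : List String) (preferred_protocol : String) : String :=
  let ranked := (urls.filter (fun u => !is_archive_url u)).map
                  (fun u => (url_rank u preferred_protocol, u))
  match PySem.List.min? ranked (fun t => t.1) with
  | none => ""
  | some t => t.2

-- ===== PRECONDITION & SPEC =====
def Spec_find_best_original_url (urls : List String) (preferred_protocol : String) (out : String) : Prop := out = find_best_original_url_alt urls preferred_protocol
instance (urls : List String) (preferred_protocol : String) (out : String) : Decidable (Spec_find_best_original_url urls preferred_protocol out) := by unfold Spec_find_best_original_url; infer_instance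

-- ===== CLAIM (what is proved, stated in full; the proofs are below) =====
def Claim_equal_find_best_original_url : Prop := ∀ (urls : List String) (preferred_protocol : String), Dom_find_best_original_url urls preferred_protocol → Spec_find_best_original_url urls preferred_protocol (find_best_original_url urls preferred_protocol)

-- ===== LEMMAS AND PROOFS =====

theorem url_rank_cases (u pp : String) :
    url_rank u pp = 0 ∨ url_rank u pp = 1 ∨ url_rank u pp = 2 := by
  unfold url_rank
  rcases Bool.eq_false_or_eq_true (pp == "https") with h | h <;>
    simp only [h, Bool.false_eq_true, ite_true, ite_false] <;> split_ifs <;> simp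

-- a URL starting with "https://" does not start with "http://" (fifth character differs)
theorem https_not_http (u : String) (h : PySem.Str.startswith u "https://" = true) :
    PySem.Str.startswith u "http://" = false := by
  simp [PySem.Str.startswith, PySem.Chars.startswith] at h ⊢
  obtain ⟨r, hr⟩ := h
  rw [← hr]
  simp [List.isPrefixOf]

theorem http_not_https (u : String) (h : PySem.Str.startswith u "http://" = true) :
    PySem.Str.startswith u "https://" = false := by
  simp [PySem.Str.startswith, PySem.Chars.startswith] at h ⊢
  obtain ⟨r, hr⟩ := h
  rw [← hr]
  simp [List.isPrefixOf]

-- B's two rank filters coincide with A's startswith filters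
theorem filter_rank0_https (L : List String) :
    L.filter (fun u => url_rank u "https" == 0) =
    L.filter (fun u => PySem.Str.startswith u "https://") := by
  apply List.filter_congr
  intro u _
  unfold url_rank
  simp only [beq_self_eq_true, ite_true]
  split_ifs with h1 h2
  · simpa [PySem.Str.startswith] using h1.symm
  · simpa [PySem.Str.startswith] using (Bool.eq_false_iff.mpr h1).symm
  · simpa [PySem.Str.startswith] using (Bool.eq_false_iff.mpr h1).symm

theorem filter_rank1_https (L : List String) :
    L.filter (fun u => url_rank u "https" == 1) =
    L.filter (fun u => PySem.Str.startswith u "http://") := by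
  apply List.filter_congr
  intro u _
  unfold url_rank
  simp only [beq_self_eq_true, ite_true]
  split_ifs with h1 h2
  · simpa [PySem.Str.startswith] using (https_not_http u h1).symm
  · simpa [PySem.Str.startswith] using h2.symm
  · simpa [PySem.Str.startswith] using (Bool.eq_false_iff.mpr h2).symm

theorem filter_rank0_other (L : List String) (pp : String) (hpp : (pp == "https") = false) :
    L.filter (fun u => url_rank u pp == 0) =
    L.filter (fun u => PySem.Str.startswith u "http://") := by
  apply List.filter_congr
  intro u _
  unfold url_rank
  simp only [hpp, Bool.false_eq_true, ite_false]
  split_ifs with h1 h2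
  · simpa [PySem.Str.startswith] using h1.symm
  · simpa [PySem.Str.startswith] using (Bool.eq_false_iff.mpr h1).symm
  · simpa [PySem.Str.startswith] using (Bool.eq_false_iff.mpr h1).symm

theorem filter_rank1_other (L : List String) (pp : String) (hpp : (pp == "https") = false) :
    L.filter (fun u => url_rank u pp == 1) =
    L.filter (fun u => PySem.Str.startswith u "https://") := by
  apply List.filter_congr
  intro u _
  unfold url_rank
  simp only [hpp, Bool.false_eq_true, ite_false]
  split_ifs with h1 h2
  · simpa [PySem.Str.startswith] using (http_not_https u h1).symm
  · simpa [PySem.Str.startswith] using h2.symm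
  · simpa [PySem.Str.startswith] using (Bool.eq_false_iff.mpr h2).symm

theorem min?_cons_cons (a b : Int × String) (t : List (Int × String)) :
    PySem.List.min? (a :: b :: t) (fun t : Int × String => t.1) =
    PySem.List.min? ((if b.1 < a.1 then b else a) :: t) (fun t : Int × String => t.1) := by
  by_cases h : b.1 < a.1 <;> simp [PySem.List.min?, h]

-- the min? of a ranked list: the first element of minimal rank, as a cascade over the rank filters
theorem min_fold' (pp : String) (L : List String) (m : Int × String)
    (hm : m.1 = 0 ∨ m.1 = 1 ∨ m.1 = 2) :
    PySem.List.min? (m :: L.map (fun u => (url_rank u pp, u))) (fun t : Int × String => t.1) =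
    some (if m.1 = 0 then m
          else match (L.filter (fun u => url_rank u pp == 0)).head? with
            | some a => ((0 : Int), a)
            | none =>
              if m.1 = 1 then m
              else match (L.filter (fun u => url_rank u pp == 1)).head? with
                | some b => ((1 : Int), b)
                | none => m) := by
  induction L generalizing m with
  | nil =>
    rcases hm with hm | hm | hm <;> simp [PySem.List.min?, hm]
  | cons u L ih =>
    rw [List.map_cons, min?_cons_cons]
    rcases url_rank_cases u pp with hu | hu | hu <;>
      rcases hm with hm | hm | hm <;>
      simp [hu, hm, List.filter_cons, ih ((0 : Int), u) (by simp),
        ih ((1 : Int), u) (by simp), ih ((2 : Int), u) (by simp), ih m (by simp [hm])]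

-- what each rank value says about the two startswith tests
theorem rank_facts_https (o : String) :
    (url_rank o "https" = 0 → PySem.Str.startswith o "https://" = true) ∧
    (url_rank o "https" = 1 → PySem.Str.startswith o "https://" = false ∧ PySem.Str.startswith o "http://" = true) ∧
    (url_rank o "https" = 2 → PySem.Str.startswith o "https://" = false ∧ PySem.Str.startswith o "http://" = false) := by
  unfold url_rank
  simp only [beq_self_eq_true, ite_true]
  split_ifs with g1 g2 <;> refine ⟨?_, ?_, ?_⟩ <;> intro h <;> simp_all <;> omega

theorem rank_facts_other (o pp : String) (hpp : (pp == "https") = false) :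
    (url_rank o pp = 0 → PySem.Str.startswith o "http://" = true) ∧
    (url_rank o pp = 1 → PySem.Str.startswith o "http://" = false ∧ PySem.Str.startswith o "https://" = true) ∧
    (url_rank o pp = 2 → PySem.Str.startswith o "http://" = false ∧ PySem.Str.startswith o "https://" = false) := by
  unfold url_rank
  simp only [hpp, Bool.false_eq_true, ite_false]
  split_ifs with g1 g2 <;> refine ⟨?_, ?_, ?_⟩ <;> intro h <;> simp_all <;> omega

theorem fbo_main (urls : List String) (pp : String) :
    find_best_original_url urls pp = find_best_original_url_alt urls pp := by
  unfold find_best_original_url find_best_original_url_alt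
  by_cases he : urls.isEmpty
  · rw [List.isEmpty_iff.mp he]; simp [PySem.List.min?]
  · simp only [he, Bool.false_eq_true, ite_false]
    cases hf : urls.filter (fun u => !is_archive_url u) with
    | nil => simp [PySem.List.min?]
    | cons o rest =>
      simp only [List.map_cons]
      rw [min_fold' pp rest (url_rank o pp, o) (url_rank_cases o pp)]
      by_cases hpp : (pp == "https") = true
      · have hppe : pp = "https" := by simpa using hpp
        subst hppe
        obtain ⟨f0, f1, f2⟩ := rank_facts_https o
        rcases url_rank_cases o "https" with hro | hro | hro
        · have hs := f0 hro
          rw [filter_rank0_https rest, filter_rank1_https rest]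
          cases rest with
          | nil => simp [hro, hs]
          | cons o2 os =>
            have e1 : (o :: o2 :: os).filter (fun u => PySem.Str.startswith u "https://") =
                o :: (o2 :: os).filter (fun u => PySem.Str.startswith u "https://") := by
              simp [List.filter_cons]
              simpa [PySem.Str.startswith] using hs
            rw [e1]
            simp [hro]
        · obtain ⟨hs1, hs2⟩ := f1 hro
          rw [filter_rank0_https rest, filter_rank1_https rest]
          cases rest with
          | nil => simp [hro, hs1, hs2]
          | cons o2 os =>
            have e1 : (o :: o2 :: os).filter (fun u => PySem.Str.startswith u "https://") =
                (o2 :: os).filter (fun u => PySem.Str.startswith u "https://") := by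
              simp [List.filter_cons]
              simpa [PySem.Str.startswith] using hs1
            have e2 : (o :: o2 :: os).filter (fun u => PySem.Str.startswith u "http://") =
                o :: (o2 :: os).filter (fun u => PySem.Str.startswith u "http://") := by
              simp [List.filter_cons]
              simpa [PySem.Str.startswith] using hs2
            rw [e1, e2]
            generalize ((o2 :: os).filter (fun u => PySem.Str.startswith u "https://")) = l0
            cases l0 <;> simp [hro]
        · obtain ⟨hs1, hs2⟩ := f2 hro
          rw [filter_rank0_https rest, filter_rank1_https rest]
          cases rest with
          | nil => simp [hro, hs1, hs2]
          | cons o2 os =>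
            have e1 : (o :: o2 :: os).filter (fun u => PySem.Str.startswith u "https://") =
                (o2 :: os).filter (fun u => PySem.Str.startswith u "https://") := by
              simp [List.filter_cons]
              simpa [PySem.Str.startswith] using hs1
            have e2 : (o :: o2 :: os).filter (fun u => PySem.Str.startswith u "http://") =
                (o2 :: os).filter (fun u => PySem.Str.startswith u "http://") := by
              simp [List.filter_cons]
              simpa [PySem.Str.startswith] using hs2
            rw [e1, e2]
            generalize ((o2 :: os).filter (fun u => PySem.Str.startswith u "https://")) = l0
            generalize ((o2 :: os).filter (fun u => PySem.Str.startswith u "http://")) = l1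
            cases l0 <;> cases l1 <;> simp [hro]
      · have hppf : (pp == "https") = false := Bool.eq_false_iff.mpr hpp
        obtain ⟨f0, f1, f2⟩ := rank_facts_other o pp hppf
        rcases url_rank_cases o pp with hro | hro | hro
        · have hs := f0 hro
          rw [filter_rank0_other rest pp hppf, filter_rank1_other rest pp hppf]
          cases rest with
          | nil => simp [hro, hs, hppf]
          | cons o2 os =>
            have e2 : (o :: o2 :: os).filter (fun u => PySem.Str.startswith u "http://") =
                o :: (o2 :: os).filter (fun u => PySem.Str.startswith u "http://") := by
              simp [List.filter_cons]
              simpa [PySem.Str.startswith] using hs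
            rw [e2]
            simp [hro, hppf]
        · obtain ⟨hs1, hs2⟩ := f1 hro
          rw [filter_rank0_other rest pp hppf, filter_rank1_other rest pp hppf]
          cases rest with
          | nil => simp [hro, hs1, hs2, hppf]
          | cons o2 os =>
            have e1 : (o :: o2 :: os).filter (fun u => PySem.Str.startswith u "https://") =
                o :: (o2 :: os).filter (fun u => PySem.Str.startswith u "https://") := by
              simp [List.filter_cons]
              simpa [PySem.Str.startswith] using hs2
            have e2 : (o :: o2 :: os).filter (fun u => PySem.Str.startswith u "http://") =
                (o2 :: os).filter (fun u => PySem.Str.startswith u "http://") := by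
              simp [List.filter_cons]
              simpa [PySem.Str.startswith] using hs1
            rw [e1, e2]
            generalize ((o2 :: os).filter (fun u => PySem.Str.startswith u "http://")) = l0
            cases l0 <;> simp [hro, hppf]
        · obtain ⟨hs1, hs2⟩ := f2 hro
          rw [filter_rank0_other rest pp hppf, filter_rank1_other rest pp hppf]
          cases rest with
          | nil => simp [hro, hs1, hs2, hppf]
          | cons o2 os =>
            have e1 : (o :: o2 :: os).filter (fun u => PySem.Str.startswith u "https://") =
                (o2 :: os).filter (fun u => PySem.Str.startswith u "https://") := by
              simp [List.filter_cons]
              simpa [PySem.Str.startswith] using hs2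
            have e2 : (o :: o2 :: os).filter (fun u => PySem.Str.startswith u "http://") =
                (o2 :: os).filter (fun u => PySem.Str.startswith u "http://") := by
              simp [List.filter_cons]
              simpa [PySem.Str.startswith] using hs1
            rw [e1, e2]
            generalize ((o2 :: os).filter (fun u => PySem.Str.startswith u "http://")) = l0
            generalize ((o2 :: os).filter (fun u => PySem.Str.startswith u "https://")) = l1
            cases l0 <;> cases l1 <;> simp [hro, hppf]

-- ===== VERDICT (by name: the statement is the Claim_ definition above) =====
theorem find_best_original_url_spec : Claim_equal_find_best_original_url := by
  intro urls pp _
  exact fbo_main urls pp
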